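-- pv_equiv track=rewrite | github.com/ghost-in-moss/GhostOS | ghostiss/core/moss/reflect.py | count_source_indent
-- ===== SOURCE A (Python) =====
-- def count_source_indent(source_code: str) -> int:
--     """
--     一个简单的方法, 用来判断一段 python 函数代码的 indent.
--     """
--     source_lines = source_code.split('\n')
--     for line in source_lines:
--         right_stripped = line.rstrip()
--         if len(right_stripped) == 0:
--             continue
--         both_stripped = right_stripped.lstrip()
--         return len(right_stripped) - len(both_stripped)
--     return 0
-- ===== SOURCE B (Python) =====
-- def count_source_indent(source_code: str) -> int:
--     # single forward scan: count the whitespace run at the current line start,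
--     # reset on newline, return the count at the first non-whitespace character
--     count = 0
--     for ch in source_code:
--         if ch == '\n':
--             count = 0
--         elif ch.isspace():
--             count += 1
--         else:
--             return count
--     return 0
-- ===== Notes on version B (the rewrite author's own statement) =====
-- stated objective: simpler
-- what changed: Replaced splitting the source into lines and rstrip/lstrip-ing each with a single forward character scan that counts the whitespace run at the current line start, resets the count on a newline, and returns it at the first non-whitespace character.
import Mathlib
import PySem

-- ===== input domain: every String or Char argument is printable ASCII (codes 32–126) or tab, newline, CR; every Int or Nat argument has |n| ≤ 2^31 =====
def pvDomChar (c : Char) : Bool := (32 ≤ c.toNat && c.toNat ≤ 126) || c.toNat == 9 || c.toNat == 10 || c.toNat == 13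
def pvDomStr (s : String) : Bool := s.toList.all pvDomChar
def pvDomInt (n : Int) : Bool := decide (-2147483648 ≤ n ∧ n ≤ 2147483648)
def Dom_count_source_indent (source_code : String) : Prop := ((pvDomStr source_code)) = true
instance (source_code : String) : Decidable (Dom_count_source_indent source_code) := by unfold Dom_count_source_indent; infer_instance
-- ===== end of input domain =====

-- B replaces A's split-into-lines-then-strip loop by a single forward character
-- scan that returns at the first non-whitespace character (objective: simpler —
-- one pass, no intermediate line list or stripped copies).

-- ===== PORT A =====
-- A's loop over source_code.split('\n'): skip lines whose rstrip is empty,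
-- else return len(rstrip) - len(lstrip(rstrip)).
def countLoopA : List (List Char) → Int
  | [] => 0
  | line :: rest =>
    let r := PySem.Chars.rstrip line
    if r.length = 0 then countLoopA rest
    else (r.length : Int) - ((PySem.Chars.lstrip r).length : Int)

def count_source_indent (source_code : String) : Int :=
  countLoopA (PySem.Chars.splitOn source_code.toList ['\n'])

-- ===== PORT B =====
-- B's scan: cnt = whitespace run at the current line start.
def scanB : Int → List Char → Int
  | _, [] => 0
  | cnt, c :: cs =>
    if c = '\n' then scanB 0 cs
    else if PySem.Chars.isspace c then scanB (cnt + 1) cs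
    else cnt

def count_source_indent_alt (source_code : String) : Int :=
  scanB 0 source_code.toList

-- ===== PRECONDITION & SPEC =====
def Spec_count_source_indent (source_code : String) (out : Int) : Prop := out = count_source_indent_alt source_code
instance (source_code : String) (out : Int) : Decidable (Spec_count_source_indent source_code out) := by unfold Spec_count_source_indent; infer_instance

-- ===== CLAIM (what is proved, stated in full; the proofs are below) =====
def Claim_equal_count_source_indent : Prop := ∀ (source_code : String), Dom_count_source_indent source_code → Spec_count_source_indent source_code (count_source_indent source_code)

-- ===== LEMMAS AND PROOFS =====

-- structural single-char splitter: splitNl cur cs, cur = reversed current piece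
def splitNl : List Char → List Char → List (List Char)
  | cur, [] => [cur.reverse]
  | cur, x :: xs => if x = '\n' then cur.reverse :: splitNl [] xs else splitNl (x :: cur) xs

-- PySem's fuel-based splitOn.go with sep = ['\n'] equals splitNl
theorem go_eq_splitNl : ∀ (cs : List Char) (fuel : Nat) (cur : List Char) (acc : List (List Char)),
    cs.length ≤ fuel →
    PySem.Chars.splitOn.go ['\n'] fuel cs cur acc = acc.reverse ++ splitNl cur cs := by
  intro cs
  induction cs with
  | nil =>
    intro fuel cur acc _
    cases fuel <;> simp [PySem.Chars.splitOn.go, splitNl]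
  | cons x xs ih =>
    intro fuel cur acc h
    cases fuel with
    | zero => simp at h
    | succ f =>
      by_cases hx : x = '\n'
      · subst hx
        have h1 : PySem.Chars.splitOn.go ['\n'] (f + 1) ('\n' :: xs) cur acc
            = PySem.Chars.splitOn.go ['\n'] f xs [] (cur.reverse :: acc) := by
          simp [PySem.Chars.splitOn.go, List.isPrefixOf]
        rw [h1, ih f [] _ (by simpa using h)]
        simp [splitNl]
      · have h1 : PySem.Chars.splitOn.go ['\n'] (f + 1) (x :: xs) cur acc
            = PySem.Chars.splitOn.go ['\n'] f xs (x :: cur) acc := by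
          simp only [PySem.Chars.splitOn.go, List.isPrefixOf]
          simp
          intro h'
          exact absurd h'.symm hx
        rw [h1, ih f (x :: cur) acc (by simpa using Nat.le_of_succ_le_succ h)]
        simp [splitNl, hx]

theorem splitOn_nl (cs : List Char) :
    PySem.Chars.splitOn cs ['\n'] = splitNl [] cs := by
  simpa using go_eq_splitNl cs (cs.length + 1) [] [] (by omega)

-- an all-whitespace line rstrips to []
theorem rstrip_all_ws (w : List Char) (hw : ∀ c ∈ w, PySem.Chars.isspace c = true) :
    PySem.Chars.rstrip w = [] := by
  simp only [PySem.Chars.rstrip, List.reverse_eq_nil_iff, List.dropWhile_eq_nil_iff]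
  intro c hc
  exact hw c (List.mem_reverse.mp hc)

-- A's per-line indent on a line = (all-ws prefix) ++ nonspace char ++ anything
theorem line_indent (w : List Char) (x : Char) (t : List Char)
    (hw : ∀ c ∈ w, PySem.Chars.isspace c = true) (hx : PySem.Chars.isspace x = false) :
    (((PySem.Chars.rstrip (w ++ x :: t)).length : Int)
      - ((PySem.Chars.lstrip (PySem.Chars.rstrip (w ++ x :: t))).length : Int)) = w.length ∧
    (PySem.Chars.rstrip (w ++ x :: t)).length ≠ 0 := by
  have hw0 : List.dropWhile PySem.Chars.isspace w = [] :=
    List.dropWhile_eq_nil_iff.mpr hw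
  have hdrop : List.dropWhile PySem.Chars.isspace ((w ++ x :: t).reverse)
      = List.dropWhile PySem.Chars.isspace t.reverse ++ x :: w.reverse := by
    have : (w ++ x :: t).reverse = t.reverse ++ x :: w.reverse := by simp
    rw [this, List.dropWhile_append]
    split
    · next hempty =>
      rw [List.isEmpty_iff] at hempty
      rw [hempty, List.dropWhile_cons, if_neg (by simp [hx])]
      simp
    · rfl
  have hr : PySem.Chars.rstrip (w ++ x :: t)
      = w ++ x :: (List.dropWhile PySem.Chars.isspace t.reverse).reverse := by
    simp only [PySem.Chars.rstrip]
    rw [hdrop]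
    simp
  have hl : PySem.Chars.lstrip (w ++ x :: (List.dropWhile PySem.Chars.isspace t.reverse).reverse)
      = x :: (List.dropWhile PySem.Chars.isspace t.reverse).reverse := by
    simp only [PySem.Chars.lstrip, List.dropWhile_append, hw0, List.isEmpty_nil, if_pos]
    rw [List.dropWhile_cons, if_neg (by simp [hx])]
  constructor
  · rw [hr, hl]; simp
  · rw [hr]; simp

-- A's loop returns w.length on a first line (all-ws w) ++ nonspace x ++ e (reversed pieces)
theorem countLoopA_nonblank (e : List Char) (x : Char) (w : List Char) (rest : List (List Char))
    (hw : ∀ c ∈ w, PySem.Chars.isspace c = true) (hx : PySem.Chars.isspace x = false) :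
    countLoopA ((e ++ x :: w).reverse :: rest) = w.length := by
  have hform : (e ++ x :: w).reverse = w.reverse ++ x :: e.reverse := by simp
  have hli := line_indent w.reverse x e.reverse
    (fun c hc => hw c (List.mem_reverse.mp hc)) hx
  simp only [countLoopA, hform]
  rw [if_neg hli.2]
  simpa using hli.1

-- once the current reversed piece is e ++ x :: w (x nonspace, w all-ws),
-- A's loop commits to indent = w.length whatever follows
theorem loopA_committed : ∀ (cs : List Char) (e : List Char) (x : Char) (w : List Char),
    (∀ c ∈ w, PySem.Chars.isspace c = true) → PySem.Chars.isspace x = false →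
    countLoopA (splitNl (e ++ x :: w) cs) = w.length := by
  intro cs
  induction cs with
  | nil =>
    intro e x w hw hx
    simpa [splitNl] using countLoopA_nonblank e x w [] hw hx
  | cons y ys ih =>
    intro e x w hw hx
    simp only [splitNl]
    by_cases hy : y = '\n'
    · rw [if_pos hy]
      exact countLoopA_nonblank e x w _ hw hx
    · rw [if_neg hy]
      exact ih (y :: e) x w hw hx

-- main invariant: cur is the all-whitespace run at the start of the current line
theorem loopA_eq_scanB : ∀ (cs : List Char) (cur : List Char),
    (∀ c ∈ cur, PySem.Chars.isspace c = true) →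
    countLoopA (splitNl cur cs) = scanB (cur.length : Int) cs := by
  intro cs
  induction cs with
  | nil =>
    intro cur hcur
    simp only [splitNl, scanB, countLoopA]
    rw [rstrip_all_ws _ (fun c hc => hcur c (List.mem_reverse.mp hc))]
    simp [countLoopA]
  | cons x xs ih =>
    intro cur hcur
    simp only [splitNl, scanB]
    by_cases hx : x = '\n'
    · rw [if_pos hx, if_pos hx]
      simp only [countLoopA]
      rw [rstrip_all_ws _ (fun c hc => hcur c (List.mem_reverse.mp hc))]
      simpa using ih [] (by simp)
    · rw [if_neg hx, if_neg hx]
      by_cases hs : PySem.Chars.isspace x = true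
      · rw [if_pos hs]
        have h' : ∀ c ∈ x :: cur, PySem.Chars.isspace c = true := by
          intro c hc
          rcases List.mem_cons.mp hc with h | h
          · rw [h]; exact hs
          · exact hcur c h
        rw [ih (x :: cur) h']
        norm_num
      · rw [if_neg hs]
        simpa using loopA_committed xs [] x cur hcur (by simpa using hs)

-- ===== VERDICT (by name: the statement is the Claim_ definition above) =====
theorem count_source_indent_spec : Claim_equal_count_source_indent := by
  intro s _
  unfold Spec_count_source_indent count_source_indent count_source_indent_alt
  rw [splitOn_nl]
  simpa using loopA_eq_scanB s.toList [] (by simp)
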